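-- pv_equiv track=rewrite | github.com/CaterPullUp/CaterPullUp | Code/GUI/CPU_GUI_FINAL.py | modif_parite
-- ===== SOURCE A (Python) =====
-- def modif_parite(msg):
--     '''
--     Modification du bit de partie du message pour assurer l'integrite du message lors de la reception. La parite paire
--     fut choisie.
--     INPUT:
--         msg: Le message a envoyer complet, mais sans partie
--     OUTPUT:
--         msg: Le message pret a etre envoye
--     '''
--     ind = 0
--     msg_bin = bin(msg)
--     for i in msg_bin:
--         if i=='1':
--             ind+=1
--         else:
--             pass
--     if ind%2 != 0:
--         msg = msg|(1<<3)
--     else: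
--         pass
--     return msg
-- ===== SOURCE B (Python) =====
-- def modif_parite(msg):
--     n = abs(msg)
--     parity = 0
--     while n:
--         parity ^= n & 1
--         n >>= 1
--     if parity == 1:
--         msg = msg | (1 << 3)
--     return msg
-- ===== Notes on version B (the rewrite author's own statement) =====
-- stated objective: idiomatic
-- what changed: B computes even parity by XOR-folding the bits of abs(msg) with shifts and masks instead of building the binary string bin(msg) and counting '1' characters, then sets the parity bit if the parity is odd.
import Mathlib
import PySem

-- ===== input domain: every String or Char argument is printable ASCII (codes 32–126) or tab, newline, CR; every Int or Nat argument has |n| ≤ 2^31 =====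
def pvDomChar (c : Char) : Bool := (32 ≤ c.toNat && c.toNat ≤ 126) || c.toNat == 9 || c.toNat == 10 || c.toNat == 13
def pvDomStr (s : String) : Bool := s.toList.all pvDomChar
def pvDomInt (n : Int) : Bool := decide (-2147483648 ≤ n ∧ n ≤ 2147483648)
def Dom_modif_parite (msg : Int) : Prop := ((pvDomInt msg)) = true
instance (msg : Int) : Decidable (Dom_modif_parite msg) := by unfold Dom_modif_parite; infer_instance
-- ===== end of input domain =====

-- B replaces A's count of '1' characters in bin(msg) by an XOR-fold over the bits of abs(msg) (objective: idiomatic; no speed claim).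

-- ===== PORT A =====
-- for i in bin(msg): if i == '1': ind += 1   — then set bit 3 if ind is odd
def modif_parite (msg : Int) : Int :=
  let msg_bin := PySem.Int.pyBin msg
  let ind : Int := msg_bin.toList.foldl (fun ind i => if i == '1' then ind + 1 else ind) 0
  if PySem.Int.mod ind 2 ≠ 0 then PySem.Int.bor msg (1 <<< 3) else msg

-- ===== PORT B =====
-- while n: parity ^= n & 1; n >>= 1   — on n = abs(msg)
def pvParityLoop (n parity : Nat) : Nat :=
  if n = 0 then parity else pvParityLoop (n / 2) (parity ^^^ (n % 2))
  decreasing_by exact Nat.bitwise_rec_lemma (by assumption)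

def modif_parite_alt (msg : Int) : Int :=
  if pvParityLoop msg.natAbs 0 = 1 then PySem.Int.bor msg (1 <<< 3) else msg

-- ===== PRECONDITION & SPEC =====
def Spec_modif_parite (msg : Int) (out : Int) : Prop := out = modif_parite_alt msg
instance (msg : Int) (out : Int) : Decidable (Spec_modif_parite msg out) := by unfold Spec_modif_parite; infer_instance

-- ===== CLAIM (what is proved, stated in full; the proofs are below) =====
def Claim_equal_modif_parite : Prop := ∀ (msg : Int), Dom_modif_parite msg → Spec_modif_parite msg (modif_parite msg)

-- ===== LEMMAS AND PROOFS =====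

-- popcount of a natural number, in the halving shape both ports reduce to
def pvPop (n : Nat) : Nat :=
  if n = 0 then 0 else n % 2 + pvPop (n / 2)
  decreasing_by exact Nat.bitwise_rec_lemma (by assumption)

-- number of '1' characters produced by Nat.toDigitsCore (enough fuel) = popcount + the ones already in ds
theorem pvCount_toDigitsCore (n : Nat) : ∀ (fuel : Nat) (ds : List Char), n < fuel →
    (Nat.toDigitsCore 2 fuel n ds).countP (· == '1') = pvPop n + ds.countP (· == '1') := by
  induction n using Nat.strong_induction_on with
  | _ n ih =>
    intro fuel ds hf
    obtain ⟨f, rfl⟩ : ∃ f, fuel = f + 1 := ⟨fuel - 1, by omega⟩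
    rw [Nat.toDigitsCore]
    by_cases h0 : n / 2 = 0
    · simp only [h0, if_true]
      have hn2 : n < 2 := by omega
      interval_cases n
      · show List.countP (· == '1') ((Nat.digitChar (0 % 2)) :: ds) = pvPop 0 + _
        rw [pvPop]
        simp [Nat.digitChar]
      · show List.countP (· == '1') ((Nat.digitChar (1 % 2)) :: ds) = pvPop 1 + _
        rw [pvPop]; rw [pvPop]
        simp [Nat.digitChar]
        omega
    · simp only [h0, if_false]
      have hlt : n / 2 < n := Nat.bitwise_rec_lemma (by omega)
      have hfl : n / 2 < f := by omega
      rw [ih (n / 2) hlt f ((n % 2).digitChar :: ds) hfl]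
      conv_rhs => rw [pvPop]
      have hne : n ≠ 0 := by omega
      rw [if_neg hne]
      have hd : ((n % 2).digitChar == '1') = decide (n % 2 = 1) := by
        have : n % 2 = 0 ∨ n % 2 = 1 := by omega
        rcases this with h | h <;> simp [h, Nat.digitChar]
      simp only [List.countP_cons, hd]
      have h2 : n % 2 = 0 ∨ n % 2 = 1 := by omega
      rcases h2 with h | h
      · simp [h]
      · simp [h]; omega

-- the '1'-count of bin(msg) is the popcount of |msg| (the '-0b' / '0b' prefix contributes none)
theorem pvCount_pyBin (msg : Int) :
    (PySem.Int.pyBin msg).toList.countP (· == '1') = pvPop msg.natAbs := by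
  rw [PySem.Int.toList_pyBin]
  unfold PySem.Int.toBinChars0b
  by_cases h : msg < 0
  · simp only [h, if_true, List.countP_cons]
    rw [Nat.toDigits, pvCount_toDigitsCore _ _ _ (by omega)]
    simp
  · simp only [h, if_false, List.countP_cons]
    rw [Nat.toDigits, pvCount_toDigitsCore _ _ _ (by omega)]
    have : msg.toNat = msg.natAbs := by omega
    simp [this]

-- the XOR fold computes the parity of the popcount
theorem pvParityLoop_eq (n : Nat) : ∀ p, p < 2 → pvParityLoop n p = (p + pvPop n) % 2 := by
  induction n using Nat.strong_induction_on with
  | _ n ih =>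
    intro p hp
    rw [pvParityLoop, pvPop]
    by_cases h0 : n = 0
    · simp only [h0, if_true]; omega
    · simp only [h0, if_false]
      have hx : p ^^^ n % 2 = (p + n % 2) % 2 := by
        have h2 : n % 2 = 0 ∨ n % 2 = 1 := by omega
        have hp' : p = 0 ∨ p = 1 := by omega
        rcases h2 with h | h <;> rcases hp' with h' | h' <;> simp [h, h']
      rw [ih (n / 2) (Nat.bitwise_rec_lemma h0) _ (by rw [hx]; omega)]
      rw [hx]; omega

-- A's Int count of '1's equals the Nat countP
theorem pvInd_eq (msg : Int) :
    (PySem.Int.pyBin msg).toList.foldl (fun ind i => if i == '1' then ind + 1 else ind) (0 : Int)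
      = (pvPop msg.natAbs : Int) := by
  rw [PySem.List.foldl_count_if (· == '1') _ 0, pvCount_pyBin]
  simp

-- ===== VERDICT (by name: the statement is the Claim_ definition above) =====
theorem modif_parite_spec : Claim_equal_modif_parite := by
  intro msg _
  unfold Spec_modif_parite modif_parite modif_parite_alt
  simp only [pvInd_eq, pvParityLoop_eq msg.natAbs 0 (by omega), Nat.zero_add,
    PySem.Int.mod_eq_emod_of_pos (by omega : (0:Int) < 2)]
  by_cases h : pvPop msg.natAbs % 2 = 1
  · rw [if_pos (by omega), if_pos h]
  · rw [if_neg (by omega), if_neg h]
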